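-- pv_equiv track=rewrite | github.com/AI-Automation-Consulting-Inc/Reporting-middleware | nlp/intent_parser.py | _detect_metric
-- ===== SOURCE A (Python) =====
-- from typing import Dict, List, Optional, Tuple
--
-- DEFAULT_METRIC = "revenue"
--
-- METRIC_SYNONYMS: Dict[str, List[str]] = {
--     "revenue": ["revenue", "sales", "turnover", "booking"],
--     "arr": ["arr", "annual recurring revenue", "recurring revenue"],
--     "acv": ["acv", "contract value", "annual contract value"],
--     "gross_margin": ["margin", "gross margin"],
--     "avg_discount": ["discount", "discount rate"],
--     "pipeline_value": ["pipeline", "pipeline value", "open pipeline"],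
--     "deal_count": ["deal count", "number of deals", "deals"],
-- }
--
-- def _detect_metric(question_lower: str, config: Dict) -> Tuple[str, bool]:
--     configured_metrics = config.get("metrics", {})
--     for metric_key, synonyms in METRIC_SYNONYMS.items():
--         if metric_key not in configured_metrics:
--             continue
--         for synonym in synonyms:
--             if synonym in question_lower:
--                 return metric_key, True
--
--     metrics = list(configured_metrics.keys())
--     if not metrics:
--         return DEFAULT_METRIC, True
--
--     default_metric = (
--         DEFAULT_METRIC if DEFAULT_METRIC in configured_metrics else metrics[0]
--     )
--
--     unsupported_reference = False
--     for metric_key, synonyms in METRIC_SYNONYMS.items():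
--         if metric_key in configured_metrics:
--             continue
--         if any(synonym in question_lower for synonym in synonyms):
--             unsupported_reference = True
--             break
--
--     return default_metric, not unsupported_reference
-- ===== SOURCE B (Python) =====
-- from typing import Dict, List, Tuple
--
-- DEFAULT_METRIC = "revenue"
--
-- METRIC_SYNONYMS: Dict[str, List[str]] = {
--     "revenue": ["revenue", "sales", "turnover", "booking"],
--     "arr": ["arr", "annual recurring revenue", "recurring revenue"],
--     "acv": ["acv", "contract value", "annual contract value"],
--     "gross_margin": ["margin", "gross margin"],
--     "avg_discount": ["discount", "discount rate"],
--     "pipeline_value": ["pipeline", "pipeline value", "open pipeline"],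
--     "deal_count": ["deal count", "number of deals", "deals"],
-- }
--
-- def _detect_metric(question_lower: str, config: Dict) -> Tuple[str, bool]:
--     configured_metrics = config.get("metrics", {})
--     unsupported = False
--     for metric_key, synonyms in METRIC_SYNONYMS.items():
--         hit = any(s in question_lower for s in synonyms)
--         if metric_key in configured_metrics:
--             if hit:
--                 return metric_key, True
--         elif hit:
--             unsupported = True
--     if not configured_metrics:
--         return DEFAULT_METRIC, True
--     default_metric = (
--         DEFAULT_METRIC if DEFAULT_METRIC in configured_metrics
--         else next(iter(configured_metrics))
--     )
--     return default_metric, not unsupported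
-- ===== Notes on version B (the rewrite author's own statement) =====
-- stated objective: simpler
-- what changed: Replaces A's two sequential passes over METRIC_SYNONYMS (one for configured matches, a second for unsupported references) with a single pass carrying an unsupported flag; a configured hit early-returns and thereby discards the flag exactly as A's short-circuit does.
import Mathlib
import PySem

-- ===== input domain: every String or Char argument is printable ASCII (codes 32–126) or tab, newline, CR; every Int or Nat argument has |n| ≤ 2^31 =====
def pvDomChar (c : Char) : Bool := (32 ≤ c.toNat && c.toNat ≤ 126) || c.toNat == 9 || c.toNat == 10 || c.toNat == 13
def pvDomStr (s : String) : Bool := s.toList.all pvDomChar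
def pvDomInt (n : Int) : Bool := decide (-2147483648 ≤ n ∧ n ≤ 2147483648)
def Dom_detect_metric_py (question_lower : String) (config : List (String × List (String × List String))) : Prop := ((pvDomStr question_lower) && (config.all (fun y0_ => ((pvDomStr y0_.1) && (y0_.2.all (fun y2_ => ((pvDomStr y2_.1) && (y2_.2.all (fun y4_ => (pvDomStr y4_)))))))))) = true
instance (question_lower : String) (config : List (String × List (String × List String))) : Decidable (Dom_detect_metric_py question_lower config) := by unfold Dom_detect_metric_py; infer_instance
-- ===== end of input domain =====

-- B merges A's two sequential passes over METRIC_SYNONYMS into one pass with an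
-- unsupported flag (objective: simpler decomposition; same return value everywhere).


-- ===== PORT A =====

-- METRIC_SYNONYMS (module constant, in its literal insertion order)
def pvMetricSynonyms : List (String × List String) :=
  [("revenue", ["revenue", "sales", "turnover", "booking"]),
   ("arr", ["arr", "annual recurring revenue", "recurring revenue"]),
   ("acv", ["acv", "contract value", "annual contract value"]),
   ("gross_margin", ["margin", "gross margin"]),
   ("avg_discount", ["discount", "discount rate"]),
   ("pipeline_value", ["pipeline", "pipeline value", "open pipeline"]),
   ("deal_count", ["deal count", "number of deals", "deals"])]

-- 'metric_key in configured_metrics' (dict key membership on the assoc list)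
def pvHasKey (conf : List (String × List String)) (k : String) : Bool :=
  conf.any (fun p => p.1 == k)

-- inner 'for synonym in synonyms: if synonym in question_lower: return …'
def pvAnyHit (q : String) : List String → Bool
  | [] => false
  | s :: rest => if PySem.Str.isIn s q then true else pvAnyHit q rest

-- A's first loop: first configured metric with a synonym in the question
def pvLoop1 (q : String) (conf : List (String × List String)) :
    List (String × List String) → Option (String × Bool)
  | [] => none
  | (k, syns) :: rest =>
    if pvHasKey conf k then
      if pvAnyHit q syns then some (k, true) else pvLoop1 q conf rest
    else pvLoop1 q conf rest

-- A's second loop: unsupported_reference (breaks at first unconfigured hit)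
def pvLoop2 (q : String) (conf : List (String × List String)) :
    List (String × List String) → Bool
  | [] => false
  | (k, syns) :: rest =>
    if pvHasKey conf k then pvLoop2 q conf rest
    else if pvAnyHit q syns then true else pvLoop2 q conf rest

def detect_metric_py (question_lower : String) (config : List (String × List (String × List String))) : String × Bool :=
  let configured := (PySem.Dict.mk config).getD "metrics" []
  match pvLoop1 question_lower configured pvMetricSynonyms with
  | some r => r
  | none =>
    let metrics := configured.map Prod.fst
    match metrics with
    | [] => ("revenue", true)
    | m0 :: _ =>
      let default_metric := if pvHasKey configured "revenue" then "revenue" else m0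
      (default_metric, !pvLoop2 question_lower configured pvMetricSynonyms)

-- ===== PORT B =====

-- single pass with an unsupported flag; the base case is B's post-loop tail
def pvBLoop (q : String) (conf : List (String × List String)) :
    List (String × List String) → Bool → String × Bool
  | [], flag =>
    match conf with
    | [] => ("revenue", true)
    | (m0, _) :: _ =>
      ((if pvHasKey conf "revenue" then "revenue" else m0), !flag)
  | (k, syns) :: rest, flag =>
    let hit := pvAnyHit q syns
    if pvHasKey conf k then
      if hit then (k, true) else pvBLoop q conf rest flag
    else pvBLoop q conf rest (flag || hit)

def detect_metric_py_alt (question_lower : String) (config : List (String × List (String × List String))) : String × Bool :=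
  pvBLoop question_lower ((PySem.Dict.mk config).getD "metrics" []) pvMetricSynonyms false

-- ===== PRECONDITION & SPEC =====
def Spec_detect_metric_py (question_lower : String) (config : List (String × List (String × List String))) (out : String × Bool) : Prop := out = detect_metric_py_alt question_lower config
instance (question_lower : String) (config : List (String × List (String × List String))) (out : String × Bool) : Decidable (Spec_detect_metric_py question_lower config out) := by unfold Spec_detect_metric_py; infer_instance

-- ===== CLAIM (what is proved, stated in full; the proofs are below) =====
def Claim_equal_detect_metric_py : Prop := ∀ (question_lower : String) (config : List (String × List (String × List String))), Dom_detect_metric_py question_lower config → Spec_detect_metric_py question_lower config (detect_metric_py question_lower config)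

-- ===== LEMMAS AND PROOFS =====

-- the shared tail of both programs, parameterised by the unsupported flag
def pvTail (conf : List (String × List String)) (u : Bool) : String × Bool :=
  match conf with
  | [] => ("revenue", true)
  | (m0, _) :: _ => ((if pvHasKey conf "revenue" then "revenue" else m0), !u)

theorem pvBLoop_eq (q : String) (conf : List (String × List String)) :
    ∀ (table : List (String × List String)) (flag : Bool),
      pvBLoop q conf table flag =
        match pvLoop1 q conf table with
        | some r => r
        | none => pvTail conf (flag || pvLoop2 q conf table) := by
  intro table
  induction table with
  | nil => intro flag; simp [pvBLoop, pvLoop1, pvLoop2, pvTail]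
  | cons hd rest ih =>
    intro flag
    obtain ⟨k, syns⟩ := hd
    by_cases hk : pvHasKey conf k = true
    · by_cases hh : pvAnyHit q syns = true
      · simp [pvBLoop, pvLoop1, hk, hh]
      · simp [pvBLoop, pvLoop1, pvLoop2, hk, hh, ih]
    · by_cases hh : pvAnyHit q syns = true
      · simp [pvBLoop, pvLoop1, pvLoop2, hk, hh, ih]
      · simp [pvBLoop, pvLoop1, pvLoop2, hk, hh, ih]

theorem detect_metric_eq (question_lower : String) (config : List (String × List (String × List String))) :
    detect_metric_py question_lower config = detect_metric_py_alt question_lower config := by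
  unfold detect_metric_py detect_metric_py_alt
  generalize (PySem.Dict.mk config).getD "metrics" [] = conf
  rw [pvBLoop_eq]
  cases h1 : pvLoop1 question_lower conf pvMetricSynonyms with
  | some r => simp [h1]
  | none =>
    simp only [h1, Bool.false_or]
    cases conf with
    | nil => simp [pvTail]
    | cons p rest => obtain ⟨m0, v⟩ := p; simp [pvTail]

-- ===== VERDICT (by name: the statement is the Claim_ definition above) =====
theorem detect_metric_py_spec : Claim_equal_detect_metric_py := by
  intro q config _
  unfold Spec_detect_metric_py
  exact detect_metric_eq q config
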